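-- pv_equiv track=rewrite | github.com/cgseife/psychoanalyze-twithead | retweetedgeanalyzerbatch.py | make_even_interval_list
-- ===== SOURCE A (Python) =====
-- def countinlist(datalist,startinterval,endinterval,inorder=True):
--     count = 0
--     for item in datalist:
--         if (int(item) >= startinterval) and (int(item)<endinterval):
--             count+=1
--         if inorder:
--             if int(item)>=endinterval:
--                 break;
--     return count;
--
-- def make_even_interval_list (datalist,resolution): #datalist is a list of values, not tuples
--     listlength = len(datalist)
--     lastentry = datalist[listlength-1]
--     outlist = []
--     currenttime = 0
--     while currenttime <= (lastentry-resolution):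
--         count = countinlist(datalist,currenttime, currenttime+resolution)
--         orderedpair = (currenttime,count)
--         outlist.append(orderedpair)
--         currenttime += resolution
--     return outlist;
-- ===== SOURCE B (Python) =====
-- def make_even_interval_list(datalist, resolution):
--     # Data-major single pass: walk the values once, emitting an interval each time
--     # a value crosses the current interval's end; flush trailing intervals with zeros.
--     lastentry = datalist[len(datalist) - 1]
--     bound = lastentry - resolution
--     outlist = []
--     currenttime = 0
--     count = 0
--     for v in datalist:
--         while currenttime <= bound and v >= currenttime + resolution:
--             outlist.append((currenttime, count))
--             count = 0
--             currenttime += resolution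
--         if currenttime > bound:
--             break
--         if v >= currenttime:
--             count += 1
--     while currenttime <= bound:
--         outlist.append((currenttime, count))
--         count = 0
--         currenttime += resolution
--     return outlist
-- ===== Notes on version B (the rewrite author's own statement) =====
-- stated objective: faster
-- what changed: Replaces A's interval-major loop (which rescans the whole list from index 0 for every interval via countinlist) with a data-major single pass over the values that emits an interval pair each time a value crosses the current interval end, then flushes the remaining empty intervals.
import Mathlib
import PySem

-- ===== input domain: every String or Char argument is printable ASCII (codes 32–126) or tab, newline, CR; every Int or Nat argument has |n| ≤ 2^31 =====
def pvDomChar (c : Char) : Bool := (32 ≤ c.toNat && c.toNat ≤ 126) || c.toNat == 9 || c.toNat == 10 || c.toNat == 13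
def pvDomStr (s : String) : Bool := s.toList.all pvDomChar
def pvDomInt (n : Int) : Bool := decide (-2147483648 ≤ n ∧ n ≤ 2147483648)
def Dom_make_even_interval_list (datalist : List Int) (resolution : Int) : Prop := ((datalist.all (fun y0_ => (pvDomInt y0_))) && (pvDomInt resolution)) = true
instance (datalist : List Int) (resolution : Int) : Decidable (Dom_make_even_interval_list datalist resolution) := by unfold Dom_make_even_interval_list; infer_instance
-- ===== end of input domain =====

-- B replaces A's interval-major loop (a full rescan of the list per interval via
-- countinlist) with one data-major pass that emits an interval pair whenever a value
-- crosses the current interval end; equivalence of the RETURN value is proved on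
-- nonempty lists for which A's while loop terminates.

-- ===== PORT A =====
-- countinlist(datalist, start, end) with the default inorder=True, count threaded as accumulator
def countinlistA : List Int → Int → Int → Int → Int
  | [], _, _, count => count
  | x :: xs, s, e, count =>
    let count' := if x ≥ s ∧ x < e then count + 1 else count
    if x ≥ e then count' else countinlistA xs s e count'

-- A's while loop; fuel only makes the recursion total (enough iterations inside Pre_)
def aLoop (datalist : List Int) (resolution lastentry : Int) :
    Nat → Int → List (Int × Int) → List (Int × Int)
  | 0, _, out => out
  | fuel + 1, t, out =>
    if t ≤ lastentry - resolution then
      aLoop datalist resolution lastentry fuel (t + resolution)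
        (out ++ [(t, countinlistA datalist t (t + resolution) 0)])
    else out

def make_even_interval_list (datalist : List Int) (resolution : Int) : List (Int × Int) :=
  -- listlength = len(datalist); datalist[listlength-1] via pyGet?
  match PySem.List.pyGet? datalist ((datalist.length : Int) - 1) with
  | none => []   -- IndexError on the empty list; excluded by Pre_
  | some lastentry => aLoop datalist resolution lastentry (lastentry.toNat + 1) 0 []

-- ===== PORT B =====
-- B's inner 'while currenttime <= bound and v >= currenttime + resolution' emit loop;
-- fuel only makes the recursion total. Returns (outlist, currenttime, count).
def emitB (res bound v : Int) : Nat → Int → Int → List (Int × Int) → List (Int × Int) × Int × Int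
  | 0, t, c, out => (out, t, c)
  | fuel + 1, t, c, out =>
    if t ≤ bound ∧ v ≥ t + res then emitB res bound v fuel (t + res) 0 (out ++ [(t, c)])
    else (out, t, c)

-- B's trailing 'while currenttime <= bound' flush loop
def flushB (res bound : Int) : Nat → Int → Int → List (Int × Int) → List (Int × Int)
  | 0, _, _, out => out
  | fuel + 1, t, c, out =>
    if t ≤ bound then flushB res bound fuel (t + res) 0 (out ++ [(t, c)]) else out

-- B's 'for v in datalist' loop (break falls through to the flush loop, which is then a no-op)
def bScan (res bound : Int) (fuel : Nat) : List Int → Int → Int → List (Int × Int) → List (Int × Int)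
  | [], t, c, out => flushB res bound fuel t c out
  | v :: vs, t, c, out =>
    let r := emitB res bound v fuel t c out
    if bound < r.2.1 then flushB res bound fuel r.2.1 r.2.2 r.1
    else bScan res bound fuel vs r.2.1 (if v ≥ r.2.1 then r.2.2 + 1 else r.2.2) r.1

def make_even_interval_list_alt (datalist : List Int) (resolution : Int) : List (Int × Int) :=
  match PySem.List.pyGet? datalist ((datalist.length : Int) - 1) with
  | none => []   -- IndexError on the empty list; excluded by Pre_
  | some lastentry =>
    bScan resolution (lastentry - resolution) (lastentry.toNat + 1) datalist 0 0 []

-- ===== PRECONDITION & SPEC =====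
-- Pre_ excludes exactly the inputs on which A does not return: the empty list
-- (IndexError on datalist[-1]) and resolution ≤ 0 with lastentry ≥ resolution
-- (A's while loop never terminates).
def Pre_make_even_interval_list (datalist : List Int) (resolution : Int) : Prop :=
  datalist ≠ [] ∧ (0 < resolution ∨ datalist.getLastD 0 < resolution)
instance (datalist : List Int) (resolution : Int) : Decidable (Pre_make_even_interval_list datalist resolution) := by unfold Pre_make_even_interval_list; infer_instance

def pvWitness_make_even_interval_list : List Int × Int := ([1, 3, 5, 8], 3)

def Spec_make_even_interval_list (datalist : List Int) (resolution : Int) (out : List (Int × Int)) : Prop := out = make_even_interval_list_alt datalist resolution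
instance (datalist : List Int) (resolution : Int) (out : List (Int × Int)) : Decidable (Spec_make_even_interval_list datalist resolution out) := by unfold Spec_make_even_interval_list; infer_instance

-- ===== CLAIM (what is proved, stated in full; the proofs are below) =====
def Claim_equal_make_even_interval_list : Prop := ∀ (datalist : List Int) (resolution : Int), Dom_make_even_interval_list datalist resolution → Pre_make_even_interval_list datalist resolution → Spec_make_even_interval_list datalist resolution (make_even_interval_list datalist resolution)

-- ===== LEMMAS AND PROOFS =====

-- scanning a prefix that never reaches the end bound neither breaks nor is lost
theorem cA_append_no_break (l1 l2 : List Int) (s e : Int) (h : ∀ x ∈ l1, x < e) :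
    ∀ c, countinlistA (l1 ++ l2) s e c = countinlistA l2 s e (countinlistA l1 s e c) := by
  induction l1 with
  | nil => intro c; rfl
  | cons x xs ih =>
    intro c
    have hx : x < e := h x (List.mem_cons_self)
    have h2 : ¬ (x ≥ e) := by omega
    simp only [List.cons_append, countinlistA, if_neg h2]
    exact ih (fun y hy => h y (List.mem_cons_of_mem x hy)) _

-- items below the interval start are neither counted nor break the scan
theorem cA_all_below (l : List Int) (s e : Int) (h : ∀ x ∈ l, x < s) (hse : s ≤ e) :
    ∀ c, countinlistA l s e c = c := by
  induction l with
  | nil => intro c; rfl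
  | cons x xs ih =>
    intro c
    have hx : x < s := h x (List.mem_cons_self)
    have h1 : ¬ (x ≥ s ∧ x < e) := by omega
    have h2 : ¬ (x ≥ e) := by omega
    simp only [countinlistA, if_neg h1, if_neg h2]
    exact ih (fun y hy => h y (List.mem_cons_of_mem x hy)) c

-- A's scan breaks (without counting) at an item at or above the end bound
theorem cA_break (v : Int) (vs : List Int) (s e c : Int) (hv : v ≥ e) :
    countinlistA (v :: vs) s e c = c := by
  have h1 : ¬ (v ≥ s ∧ v < e) := by omega
  simp only [countinlistA, if_neg h1, if_pos hv]

-- A's loop is inert once currenttime exceeds the bound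
theorem aLoop_stop (dl : List Int) (res last : Int) (f : Nat) (t : Int)
    (out : List (Int × Int)) (h : ¬ t ≤ last - res) :
    aLoop dl res last f t out = out := by
  match f with
  | 0 => rfl
  | f + 1 => simp only [aLoop, if_neg h]

-- B's flush loop is inert once currenttime exceeds the bound
theorem flushB_stop (res bound : Int) (f : Nat) (t c : Int)
    (out : List (Int × Int)) (h : ¬ t ≤ bound) :
    flushB res bound f t c out = out := by
  match f with
  | 0 => rfl
  | f + 1 => simp only [flushB, if_neg h]

-- any two sufficient fuels give A's loop the same value
theorem aLoop_fuel_irrel (dl : List Int) (res last : Int) (hres : 0 < res) :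
    ∀ (f g : Nat) (t : Int) (out : List (Int × Int)),
      last - res - t < f → last - res - t < g →
      aLoop dl res last f t out = aLoop dl res last g t out := by
  intro f
  induction f with
  | zero =>
    intro g t out hf _
    have h : ¬ t ≤ last - res := by omega
    rw [aLoop_stop dl res last 0 t out h, aLoop_stop dl res last g t out h]
  | succ f ih =>
    intro g t out hf hg
    by_cases hc : t ≤ last - res
    · match g with
      | 0 => omega
      | g + 1 =>
        simp only [aLoop, if_pos hc]
        exact ih g (t + res) _ (by omega) (by omega)
    · rw [aLoop_stop dl res last (f + 1) t out hc, aLoop_stop dl res last g t out hc]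

-- B's flush loop finishes A's remaining intervals once the data is exhausted
theorem flushB_spec (res last : Int) (hres : 0 < res) (pre : List Int) :
    ∀ (f : Nat) (t c : Int) (out : List (Int × Int)),
      (∀ x ∈ pre, x < t + res) → c = countinlistA pre t (t + res) 0 →
      last - res - t < f →
      flushB res (last - res) f t c out = aLoop pre res last f t out := by
  intro f
  induction f with
  | zero => intro t c out _ _ hf; rfl
  | succ f ih =>
    intro t c out hpre hc hf
    by_cases hb : t ≤ last - res
    · simp only [flushB, aLoop, if_pos hb]
      rw [← hc]
      exact ih (t + res) 0 _ (fun x hx => by have := hpre x hx; omega)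
        ((cA_all_below pre (t + res) (t + res + res) (fun x hx => hpre x hx) (by omega) 0).symm)
        (by omega)
    · simp only [flushB, aLoop, if_neg hb]

-- B's emit loop performs exactly A's intervals strictly before the value v,
-- preserving the scan invariant
theorem emitB_spec (res last v : Int) (hres : 0 < res) (pre : List Int) (vs : List Int) :
    ∀ (f : Nat) (t c : Int) (out : List (Int × Int)),
      (∀ x ∈ pre, x < t + res) → c = countinlistA pre t (t + res) 0 →
      last - res - t < f →
      (aLoop (pre ++ v :: vs) res last f t out =
         aLoop (pre ++ v :: vs) res last f (emitB res (last - res) v f t c out).2.1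
           (emitB res (last - res) v f t c out).1) ∧
      t ≤ (emitB res (last - res) v f t c out).2.1 ∧
      ((emitB res (last - res) v f t c out).2.1 ≤ last - res →
         v < (emitB res (last - res) v f t c out).2.1 + res) ∧
      (emitB res (last - res) v f t c out).2.2 =
        countinlistA pre (emitB res (last - res) v f t c out).2.1
          ((emitB res (last - res) v f t c out).2.1 + res) 0 ∧
      last - res - (emitB res (last - res) v f t c out).2.1 < f := by
  intro f
  induction f with
  | zero =>
    intro t c out _ hc hf
    have hemit : emitB res (last - res) v 0 t c out = (out, t, c) := rfl
    rw [hemit]; dsimp only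
    exact ⟨rfl, le_refl t, fun ht => by omega, hc, by omega⟩
  | succ f ih =>
    intro t c out hpre hc hf
    by_cases hcond : t ≤ last - res ∧ v ≥ t + res
    · have hemit : emitB res (last - res) v (f + 1) t c out =
          emitB res (last - res) v f (t + res) 0 (out ++ [(t, c)]) := by
        simp only [emitB, if_pos hcond]
      rw [hemit]
      have hpre' : ∀ x ∈ pre, x < (t + res) + res := fun x hx => by
        have := hpre x hx; omega
      have hc' : (0 : Int) = countinlistA pre (t + res) ((t + res) + res) 0 :=
        (cA_all_below pre (t + res) (t + res + res) (fun x hx => hpre x hx) (by omega) 0).symm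
      obtain ⟨ha, hle, hstop, hcc, hfb⟩ := ih (t + res) 0 (out ++ [(t, c)]) hpre' hc' (by omega)
      refine ⟨?_, by omega, hstop, hcc, by omega⟩
      -- A performs the interval at t with count c, then continues from t + res
      have hcount : countinlistA (pre ++ v :: vs) t (t + res) 0 = c := by
        rw [cA_append_no_break pre (v :: vs) t (t + res) hpre,
          cA_break v vs t (t + res) _ (by omega), hc]
      have hA1 : aLoop (pre ++ v :: vs) res last (f + 1) t out =
          aLoop (pre ++ v :: vs) res last f (t + res) (out ++ [(t, c)]) := by
        simp only [aLoop, if_pos hcond.1, hcount]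
      rw [hA1, ha]
      exact aLoop_fuel_irrel _ res last hres f (f + 1) _ _ hfb (by omega)
    · have hemit : emitB res (last - res) v (f + 1) t c out = (out, t, c) := by
        simp only [emitB, if_neg hcond]
      rw [hemit]; dsimp only
      exact ⟨rfl, le_refl t, fun ht => by omega, hc, by omega⟩

-- B does nothing at all once the loop bound is below the start time
theorem bScan_stop (res bound : Int) (f : Nat) (rem : List Int) (t c : Int)
    (out : List (Int × Int)) (h : bound < t) : bScan res bound (f + 1) rem t c out = out := by
  match rem with
  | [] => exact flushB_stop res bound (f + 1) t c out (by omega)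
  | v :: vs =>
    have hcond : ¬ (t ≤ bound ∧ v ≥ t + res) := by omega
    simp only [bScan, emitB, if_neg hcond, if_pos h]
    exact flushB_stop res bound (f + 1) t c out (by omega)

-- the main data-major invariant: B's scan finishes A's loop
theorem bScan_eq_aLoop (res last : Int) (hres : 0 < res) :
    ∀ (rem : List Int) (t c : Int) (out : List (Int × Int)) (pre : List Int) (F : Nat),
      (∀ x ∈ pre, x < t + res) → c = countinlistA pre t (t + res) 0 →
      last - res - t < F →
      bScan res (last - res) F rem t c out = aLoop (pre ++ rem) res last F t out := by
  intro rem
  induction rem with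
  | nil =>
    intro t c out pre F hpre hc hF
    simp only [bScan, List.append_nil]
    exact flushB_spec res last hres pre F t c out hpre hc hF
  | cons v vs ih =>
    intro t c out pre F hpre hc hF
    obtain ⟨ha, hle, hstop, hcc, hfb⟩ := emitB_spec res last v hres pre vs F t c out hpre hc hF
    set r := emitB res (last - res) v F t c out with hr
    by_cases hb : last - res < r.2.1
    · simp only [bScan, ← hr, if_pos hb]
      rw [flushB_stop res (last - res) F r.2.1 r.2.2 r.1 (by omega), ha]
      exact (aLoop_stop _ res last F r.2.1 r.1 (by omega)).symm
    · simp only [bScan, ← hr, if_neg hb]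
      have hvlt : v < r.2.1 + res := hstop (by omega)
      have hpre' : ∀ x ∈ pre ++ [v], x < r.2.1 + res := by
        intro x hx
        rcases List.mem_append.mp hx with hx | hx
        · have := hpre x hx; omega
        · simp only [List.mem_singleton] at hx; omega
      have hc' : (if v ≥ r.2.1 then r.2.2 + 1 else r.2.2) =
          countinlistA (pre ++ [v]) r.2.1 (r.2.1 + res) 0 := by
        rw [cA_append_no_break pre [v] r.2.1 (r.2.1 + res)
          (fun x hx => by have := hpre x hx; omega), ← hcc]
        have h2 : ¬ ((v : Int) ≥ r.2.1 + res) := by omega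
        by_cases hv : v ≥ r.2.1
        · have h1 : v ≥ r.2.1 ∧ v < r.2.1 + res := ⟨hv, hvlt⟩
          simp only [countinlistA, if_pos h1, if_neg h2, if_pos hv]
        · have h1 : ¬ (v ≥ r.2.1 ∧ v < r.2.1 + res) := by omega
          simp only [countinlistA, if_neg h1, if_neg h2, if_neg hv]
      rw [ih r.2.1 (if v ≥ r.2.1 then r.2.2 + 1 else r.2.2) r.1 (pre ++ [v]) F hpre' hc' (by omega),
        ha]
      simp only [List.append_assoc, List.cons_append, List.nil_append]

-- A's datalist[len-1] is the last element, for a nonempty list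
theorem pyGet_last (datalist : List Int) (h : datalist ≠ []) :
    PySem.List.pyGet? datalist ((datalist.length : Int) - 1) = some (datalist.getLastD 0) := by
  have hlen : 1 ≤ datalist.length := List.length_pos_iff.mpr h
  have hcast : ((datalist.length : Int) - 1) = ((datalist.length - 1 : Nat) : Int) := by
    omega
  rw [hcast, PySem.List.pyGet?_natCast]
  rw [List.getElem?_eq_getElem (by omega)]
  rw [List.getLastD_eq_getLast?, List.getLast?_eq_getElem?,
    List.getElem?_eq_getElem (by omega)]
  rfl

-- ===== VERDICT (by name: the statement is the Claim_ definition above) =====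
theorem make_even_interval_list_spec : Claim_equal_make_even_interval_list := by
  intro datalist resolution _ hpre
  obtain ⟨hne, hres⟩ := hpre
  unfold Spec_make_even_interval_list make_even_interval_list make_even_interval_list_alt
  rw [pyGet_last datalist hne]
  dsimp only
  set last := datalist.getLastD 0 with hlast
  rcases hres with hr | hlt
  · have h := bScan_eq_aLoop resolution last hr datalist 0 0 [] [] (last.toNat + 1)
      (by simp) rfl (by omega)
    simpa using h.symm
  · -- the loop bound is already negative: both sides return []
    have hb : ¬ ((0 : Int) ≤ last - resolution) := by omega
    rw [aLoop_stop datalist resolution last _ 0 [] hb]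
    exact (bScan_stop resolution (last - resolution) last.toNat datalist 0 0 [] (by omega)).symm
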